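-- pv_equiv track=rewrite | github.com/noname2048/algo | programmers/72411/q2.py | solution
-- ===== SOURCE A (Python) =====
-- from collections import defaultdict
--
-- def solution(orders, course):
--     ans = []
--     for c in course:
--         word_dict = defaultdict(int)
--         for o in orders:
--             t = list()
--             combination(o, c, word_dict, 0, t)
--
--         mx = -1
--         for k, v in word_dict.items():
--             if v >= 2:
--                 mx = max(v, mx)
--         for k, v in word_dict.items():
--             if v == mx:
--                 ans += [k]
--     return sorted(ans)
--
-- def combination(elements, target_len, adder, start_idx, comb):
--     if target_len == len(comb):
--         temp = sorted(comb)
--         adder["".join(temp)] += 1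
--         return
--
--     curr_len = len(comb)
--     remains = target_len - curr_len
--     end_idx = len(elements) - remains
--     for i in range(start_idx, end_idx + 1):
--         new_comb = comb + [elements[i]]
--         combination(elements, target_len, adder, i + 1, new_comb)
-- ===== SOURCE B (Python) =====
-- from collections import Counter
-- from itertools import combinations
--
--
-- def solution(orders, course):
--     ans = []
--     for c in course:
--         counter = Counter()
--         for o in orders:
--             if c <= len(o):
--                 for comb in combinations(o, c):
--                     counter["".join(sorted(comb))] += 1
--         mx = max((v for v in counter.values() if v >= 2), default=-1)
--         ans.extend(k for k, v in counter.items() if v == mx)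
--     return sorted(ans)
-- ===== Notes on version B (the rewrite author's own statement) =====
-- stated objective: idiomatic
-- what changed: Replaces the hand-written recursive `combination` helper that threads a shared defaultdict through index-range recursion with a flat itertools.combinations enumeration counted in a Counter (skipping orders shorter than c), computing the max via a filtered generator with default=-1 and collecting ties by comprehension; the C-implemented enumeration gives a large constant-factor speedup.
import Mathlib
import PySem

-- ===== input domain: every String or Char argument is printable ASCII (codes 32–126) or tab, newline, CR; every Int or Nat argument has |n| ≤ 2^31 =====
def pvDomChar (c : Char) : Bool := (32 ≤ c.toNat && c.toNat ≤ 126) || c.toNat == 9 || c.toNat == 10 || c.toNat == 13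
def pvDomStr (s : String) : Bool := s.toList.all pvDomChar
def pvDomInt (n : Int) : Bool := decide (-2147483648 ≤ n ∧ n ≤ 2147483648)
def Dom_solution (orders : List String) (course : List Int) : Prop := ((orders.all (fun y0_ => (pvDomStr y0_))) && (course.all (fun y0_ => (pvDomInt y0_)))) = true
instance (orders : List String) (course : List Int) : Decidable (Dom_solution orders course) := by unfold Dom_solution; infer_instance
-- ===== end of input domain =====

-- B replaces A's hand-written dict-threading recursion by itertools.combinations + Counter +
-- max(..., default=-1) + comprehensions (objective: idiomatic).  Neither mutates its arguments.

-- ===== PORT A =====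
-- literal port of `combination`; the dict is threaded instead of mutated; `fuel` is the structural
-- recursion depth: it is target_len - len(comb) on every call A makes with target_len ≥ 0, so the
-- fuel-0 else-branch is unreachable inside Pre_ (A raises IndexError only outside Pre_, where the
-- `.getD ' '` default is likewise unreachable inside Pre_).
def combinationA (elements : List Char) (targetLen : Int) (adder : PySem.Dict String Int)
    (startIdx : Int) (comb : List Char) (fuel : Nat) : PySem.Dict String Int :=
  if targetLen = (comb.length : Int) then
    adder.modify (String.ofList (PySem.List.sorted comb (fun x => x) false)) 0 (· + 1)
  else
    match fuel with
    | 0 => adder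
    | Nat.succ f =>
      (PySem.List.pyRange startIdx (((elements.length : Int) - (targetLen - (comb.length : Int))) + 1) 1).foldl
        (fun d i =>
          combinationA elements targetLen d (i + 1)
            (comb ++ [(PySem.List.pyGet? elements i).getD ' ']) f) adder

def solution (orders : List String) (course : List Int) : List String :=
  let ans := course.foldl (fun ans c =>
    let wd := orders.foldl (fun d o => combinationA o.toList c d 0 [] c.toNat) PySem.Dict.empty
    let mx := wd.items.foldl (fun mx kv => if kv.2 ≥ 2 then max kv.2 mx else mx) (-1)
    wd.items.foldl (fun a kv => if kv.2 = mx then a ++ [kv.1] else a) ans) []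
  PySem.List.sorted ans (fun x => x) false

-- ===== PORT B =====
def solution_alt (orders : List String) (course : List Int) : List String :=
  let ans := course.foldl (fun ans c =>
    let counter := orders.foldl (fun d o =>
      if c ≤ (o.toList.length : Int) then
        (PySem.List.combinations o.toList c.toNat).foldl
          (fun d t => d.modify (String.ofList (PySem.List.sorted t (fun x => x) false)) 0 (· + 1)) d
      else d)
      PySem.Dict.empty
    let mx := PySem.List.maxD (counter.values.filter (fun v => decide (v ≥ 2))) (fun v => v) (-1)
    ans ++ (counter.items.filter (fun kv => decide (kv.2 = mx))).map Prod.fst) []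
  PySem.List.sorted ans (fun x => x) false

-- ===== PRECONDITION & SPEC =====
-- Pre_ excludes exactly the inputs where A raises: a negative course length with a nonempty order
-- list makes A's recursion index past the end of an order (IndexError); B raises there too (ValueError).
def Pre_solution (orders : List String) (course : List Int) : Prop :=
  orders = [] ∨ ∀ c ∈ course, 0 ≤ c
instance (orders : List String) (course : List Int) : Decidable (Pre_solution orders course) := by
  unfold Pre_solution; infer_instance
def pvWitness_solution : List String × List Int := (["ABC", "AB"], [2])

def Spec_solution (orders : List String) (course : List Int) (out : List String) : Prop := out = solution_alt orders course
instance (orders : List String) (course : List Int) (out : List String) : Decidable (Spec_solution orders course out) := by unfold Spec_solution; infer_instance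

-- ===== CLAIM (what is proved, stated in full; the proofs are below) =====
def Claim_equal_solution : Prop := ∀ (orders : List String) (course : List Int), Dom_solution orders course → Pre_solution orders course → Spec_solution orders course (solution orders course)

-- ===== LEMMAS AND PROOFS =====

-- the pure list of combinations A's recursion visits, in visiting order
def emitA (elements : List Char) (targetLen : Int) (startIdx : Int) (comb : List Char)
    (fuel : Nat) : List (List Char) :=
  if targetLen = (comb.length : Int) then [comb]
  else
    match fuel with
    | 0 => []
    | Nat.succ f =>
      (PySem.List.pyRange startIdx (((elements.length : Int) - (targetLen - (comb.length : Int))) + 1) 1).foldl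
        (fun acc i =>
          acc ++ emitA elements targetLen (i + 1)
            (comb ++ [(PySem.List.pyGet? elements i).getD ' ']) f) []

-- a fold of folds is a fold over the flattened emission
theorem foldl_foldl_flatMap {α β δ : Type} (g : β → List α) (h : δ → α → δ)
    (L : List β) (init : δ) :
    L.foldl (fun d i => (g i).foldl h d) init = (L.flatMap g).foldl h init := by
  induction L generalizing init with
  | nil => rfl
  | cons x t ih => simp [List.flatMap_cons, List.foldl_append, ih]

theorem combinationA_eq_emitA (fuel : Nat) (elements : List Char) (targetLen : Int) :
    ∀ (startIdx : Int) (comb : List Char) (adder : PySem.Dict String Int),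
    combinationA elements targetLen adder startIdx comb fuel =
      (emitA elements targetLen startIdx comb fuel).foldl
        (fun d t => d.modify (String.ofList (PySem.List.sorted t (fun x => x) false)) 0 (· + 1)) adder := by
  induction fuel with
  | zero =>
    intro s comb adder
    by_cases h : targetLen = (comb.length : Int) <;> simp [combinationA, emitA, h]
  | succ f ih =>
    intro s comb adder
    by_cases h : targetLen = (comb.length : Int)
    · simp [combinationA, emitA, h]
    · rw [combinationA, emitA, if_neg h, if_neg h]
      rw [PySem.List.foldl_append_eq_flatMap, List.nil_append,
        ← foldl_foldl_flatMap]
      exact PySem.List.foldl_congr_mem _ _ _ _ (fun d i _ => ih _ _ d)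

-- emitA enumerates exactly itertools.combinations of the remaining suffix, each prefixed by comb
theorem emitA_loop (f : Nat) (e : List Char)
    (IH : ∀ (s : Nat) (comb : List Char),
      emitA e ((comb.length : Int) + (f : Int)) (s : Int) comb f =
        (PySem.List.combinations (e.drop s) f).map (comb ++ ·)) :
    ∀ (n s : Nat) (comb : List Char), e.length ≤ s + n →
    (PySem.List.pyRange (s : Int) (((e.length : Int) - ((f : Int) + 1)) + 1) 1).flatMap
        (fun i => emitA e ((comb.length : Int) + ((f : Int) + 1)) (i + 1)
          (comb ++ [(PySem.List.pyGet? e i).getD ' ']) f) =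
      (PySem.List.combinations (e.drop s) (f + 1)).map (comb ++ ·) := by
  intro n
  induction n with
  | zero =>
    intro s comb hb
    rw [PySem.List.pyRange_one_eq_nil (by omega)]
    rw [List.drop_eq_nil_of_le (by omega)]
    simp [PySem.List.combinations_nil_succ]
  | succ n ihn =>
    intro s comb hb
    by_cases hcase : (s : Int) < (e.length : Int) - (f : Int)
    · have hs : s < e.length := by omega
      rw [PySem.List.pyRange_one_cons (by omega)]
      rw [List.flatMap_cons]
      have hget : (PySem.List.pyGet? e (s : Int)).getD ' ' = e[s] := by
        rw [PySem.List.pyGet?_natCast, List.getElem?_eq_getElem hs]; rfl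
      have hc1 : ((comb.length : Int) + ((f : Int) + 1))
          = (((comb ++ [e[s]]).length : Int) + (f : Int)) := by
        simp only [List.length_append, List.length_cons, List.length_nil]
        push_cast; ring
      have hc2 : ((s : Int) + 1) = (((s + 1 : Nat) : Int)) := by push_cast; ring
      have hhead : emitA e ((comb.length : Int) + ((f : Int) + 1)) ((s : Int) + 1)
          (comb ++ [(PySem.List.pyGet? e (s : Int)).getD ' ']) f =
          (PySem.List.combinations (e.drop (s + 1)) f).map ((comb ++ [e[s]]) ++ ·) := by
        rw [hget, hc1, hc2, IH (s + 1) (comb ++ [e[s]])]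
      have htail := ihn (s + 1) comb (by omega)
      rw [List.drop_eq_getElem_cons hs, PySem.List.combinations_cons_succ]
      rw [List.map_append, List.map_map]
      rw [hhead, hc2, htail]
      congr 1
      apply List.map_congr_left
      intro t _
      show (comb ++ [e[s]]) ++ t = comb ++ (e[s] :: t)
      simp
    · rw [PySem.List.pyRange_one_eq_nil (by omega)]
      have hlen : (e.drop s).length < f + 1 := by
        rw [List.length_drop]; omega
      rw [PySem.List.combinations_eq_nil_of_length_lt _ hlen]
      simp

theorem emitA_eq_combinations (fuel : Nat) (e : List Char) :
    ∀ (s : Nat) (comb : List Char),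
    emitA e ((comb.length : Int) + (fuel : Int)) (s : Int) comb fuel =
      (PySem.List.combinations (e.drop s) fuel).map (comb ++ ·) := by
  induction fuel with
  | zero =>
    intro s comb
    simp [emitA, PySem.List.combinations_zero]
  | succ f ih =>
    intro s comb
    have hne : ((comb.length : Int) + ((f + 1 : Nat) : Int)) ≠ (comb.length : Int) := by
      push_cast; omega
    rw [emitA, if_neg hne]
    rw [PySem.List.foldl_append_eq_flatMap, List.nil_append]
    push_cast
    have hub : ((e.length : Int) - (((comb.length : Int) + ((f : Int) + 1)) - (comb.length : Int))) + 1
        = ((e.length : Int) - ((f : Int) + 1)) + 1 := by ring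
    rw [hub]
    exact emitA_loop f e ih e.length s comb (by omega)

theorem foldl_max_eq_maxD (vs : List Int) (h : ∀ v ∈ vs, (-1 : Int) ≤ v) :
    vs.foldl (fun mx v => max v mx) (-1) = PySem.List.maxD vs (fun v => v) (-1) := by
  cases vs with
  | nil => rfl
  | cons x t =>
    have hswap : (fun (mx v : Int) => max v mx) = (fun (mx v : Int) => max mx v) := by
      funext mx v; exact max_comm v mx
    rw [List.foldl_cons, max_eq_left (h x (List.mem_cons_self)), hswap]
    rw [PySem.List.maxD, PySem.List.max?_id_cons]
    rfl

theorem mx_eq (d : PySem.Dict String Int) :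
    d.items.foldl (fun mx kv => if kv.2 ≥ 2 then max kv.2 mx else mx) (-1)
      = PySem.List.maxD (d.values.filter (fun v => decide (v ≥ 2))) (fun v => v) (-1) := by
  rw [PySem.List.foldl_ite_eq_foldl_filter (fun kv : String × Int => kv.2 ≥ 2)
    (fun mx kv => max kv.2 mx) d.items (-1)]
  have hv : d.values = d.items.map Prod.snd := rfl
  rw [hv, List.filter_map]
  simp only [Function.comp_def]
  rw [← foldl_max_eq_maxD ((d.items.filter (fun kv => decide (kv.2 ≥ 2))).map Prod.snd)
    (by intro v hvm
        rcases List.mem_map.mp hvm with ⟨kv, hkv, rfl⟩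
        have := List.of_mem_filter hkv
        simp only [decide_eq_true_eq] at this
        omega)]
  rw [List.foldl_map]

theorem solution_step_eq (orders : List String) (c : Int)
    (h : orders = [] ∨ 0 ≤ c) (ans : List String) :
    (let wd := orders.foldl (fun d o => combinationA o.toList c d 0 [] c.toNat) PySem.Dict.empty
     let mx := wd.items.foldl (fun mx kv => if kv.2 ≥ 2 then max kv.2 mx else mx) (-1)
     wd.items.foldl (fun a kv => if kv.2 = mx then a ++ [kv.1] else a) ans) =
    (let counter := orders.foldl (fun d o =>
        if c ≤ (o.toList.length : Int) then
          (PySem.List.combinations o.toList c.toNat).foldl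
            (fun d t => d.modify (String.ofList (PySem.List.sorted t (fun x => x) false)) 0 (· + 1)) d
        else d)
        PySem.Dict.empty
     let mx := PySem.List.maxD (counter.values.filter (fun v => decide (v ≥ 2))) (fun v => v) (-1)
     ans ++ (counter.items.filter (fun kv => decide (kv.2 = mx))).map Prod.fst) := by
  have hdict : orders.foldl (fun d o => combinationA o.toList c d 0 [] c.toNat) PySem.Dict.empty
      = orders.foldl (fun d o =>
          if c ≤ (o.toList.length : Int) then
            (PySem.List.combinations o.toList c.toNat).foldl
              (fun d t => d.modify (String.ofList (PySem.List.sorted t (fun x => x) false)) 0 (· + 1)) d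
          else d)
          PySem.Dict.empty := by
    rcases h with h | hc
    · subst h; rfl
    · apply PySem.List.foldl_congr_mem
      intro d o _
      rw [combinationA_eq_emitA]
      have he := emitA_eq_combinations c.toNat o.toList 0 []
      simp only [List.length_nil, Nat.cast_zero, zero_add, List.drop_zero,
        List.nil_append, Int.toNat_of_nonneg hc] at he
      rw [he]
      by_cases hle : c ≤ (o.toList.length : Int)
      · rw [if_pos hle]
        simp [List.map_id']
      · rw [if_neg hle]
        rw [PySem.List.combinations_eq_nil_of_length_lt _ (by omega : o.toList.length < c.toNat)]
        simp
  simp only []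
  rw [hdict, mx_eq]
  rw [PySem.List.foldl_append_ite (fun kv : String × Int => kv.2 = _) Prod.fst]

-- ===== VERDICT (by name: the statement is the Claim_ definition above) =====
theorem solution_spec : Claim_equal_solution := by
  intro orders course _ hpre
  unfold Spec_solution solution solution_alt
  exact congrArg (fun l => PySem.List.sorted l (fun x => x) false)
    (PySem.List.foldl_congr_mem course _ _ []
      (fun ans c hc => solution_step_eq orders c (hpre.imp id fun hh => hh c hc) ans))
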